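-- pv_equiv track=rewrite | github.com/krob2610/SkiTurnDetection | app/workflow/utils.py | merge_close_integers
-- ===== SOURCE A (Python) =====
-- def merge_close_integers(int_list, count_list, threshold=5):
--     """
--     * Used after we obtain extremas/counts. Need to be used twice for (min and max)
--     t is merging close points
--     so for example if there is 5 points :
--     3, 6, 15, 30, 32 with counts 1, 10, 2, 30, 2 and te threshold is 5
--     it will return the list of points 6, 15, 30 with counts 11, 2, 32
--     """
--     merged_ints = []
--     merged_counts = []
--
--     i = 0
--     while i < len(int_list):
--         current_int = int_list[i]
--         current_count = count_list[i]
--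
--         # Merge all consecutive numbers within the threshold
--         while i < len(int_list) - 1 and abs(int_list[i] - int_list[i + 1]) <= threshold:
--             i += 1
--             current_int = int_list[i] if count_list[i] > current_count else current_int
--             current_count += count_list[i]
--
--         merged_ints.append(current_int)
--         merged_counts.append(current_count)
--         i += 1
--
--     return merged_ints, merged_counts
-- ===== SOURCE B (Python) =====
-- def merge_close_integers(int_list, count_list, threshold=5):
--     # Two-pass decomposition: first partition the (value, count) pairs into
--     # chains of adjacent-close values, then reduce each chain independently.
--     pairs = list(zip(int_list, count_list))
--     groups = []
--     for v, c in pairs: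
--         if groups and abs(groups[-1][-1][0] - v) <= threshold:
--             groups[-1].append((v, c))
--         else:
--             groups.append([(v, c)])
--     merged_ints = []
--     merged_counts = []
--     for g in groups:
--         val, total = g[0]
--         for v, c in g[1:]:
--             if c > total:
--                 val = v
--             total += c
--         merged_ints.append(val)
--         merged_counts.append(total)
--     return merged_ints, merged_counts
-- ===== Notes on version B (the rewrite author's own statement) =====
-- stated objective: simpler
-- what changed: B replaces A's index-driven while loop with a nested merging while by a two-pass decomposition: zip the values with their counts, partition the pairs into chains of adjacent-close values, then reduce each chain independently to (kept value, summed count).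
import Mathlib
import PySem

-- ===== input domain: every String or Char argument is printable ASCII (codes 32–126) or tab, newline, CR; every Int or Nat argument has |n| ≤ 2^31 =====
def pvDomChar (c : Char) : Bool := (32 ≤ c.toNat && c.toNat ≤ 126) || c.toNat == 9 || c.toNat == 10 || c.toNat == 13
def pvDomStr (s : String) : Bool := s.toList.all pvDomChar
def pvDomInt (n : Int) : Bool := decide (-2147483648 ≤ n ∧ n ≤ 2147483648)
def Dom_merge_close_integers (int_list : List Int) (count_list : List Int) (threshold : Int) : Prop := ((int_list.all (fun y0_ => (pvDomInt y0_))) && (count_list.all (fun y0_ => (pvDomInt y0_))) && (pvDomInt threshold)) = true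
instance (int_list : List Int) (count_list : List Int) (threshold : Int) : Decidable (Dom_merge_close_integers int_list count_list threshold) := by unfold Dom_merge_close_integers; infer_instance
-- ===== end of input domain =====

-- B merges the same chains of close values but by a two-pass decomposition (partition into
-- chains, then reduce each chain); objective: simpler.  Return-value equivalence only.

-- ===== PORT A =====
-- A's inner `while`: advance i while the next value is within threshold, folding the count
-- in and replacing the kept value when the new count exceeds the running total.
-- List accesses use getD 0; under Pre_ every access is in range (Python would raise otherwise).
-- The fuel argument (always ≥ the remaining iterations) only makes the loop total.
def mciInner (int_list count_list : List Int) (threshold : Int) :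
    Nat → Nat → Int → Int → Nat × Int × Int
  | 0, i, ci, cc => (i, ci, cc)
  | fuel + 1, i, ci, cc =>
    if i + 1 < int_list.length ∧ |int_list.getD i 0 - int_list.getD (i + 1) 0| ≤ threshold then
      mciInner int_list count_list threshold fuel (i + 1)
        (if count_list.getD (i + 1) 0 > cc then int_list.getD (i + 1) 0 else ci)
        (cc + count_list.getD (i + 1) 0)
    else
      (i, ci, cc)

-- A's outer `while i < len(int_list)` loop, appending one merged (value, count) per group.
def mciOuter (int_list count_list : List Int) (threshold : Int) :
    Nat → Nat → List Int → List Int → List Int × List Int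
  | 0, _, mi, mc => (mi, mc)
  | fuel + 1, i, mi, mc =>
    if i < int_list.length then
      let r := mciInner int_list count_list threshold (int_list.length + 1) i
        (int_list.getD i 0) (count_list.getD i 0)
      mciOuter int_list count_list threshold fuel (r.1 + 1) (mi ++ [r.2.1]) (mc ++ [r.2.2])
    else
      (mi, mc)

def merge_close_integers (int_list : List Int) (count_list : List Int) (threshold : Int) :
    List Int × List Int :=
  mciOuter int_list count_list threshold (int_list.length + 1) 0 [] []

-- ===== PORT B =====
-- one pair merged into the running (value, total) state
def mciStep (s : Int × Int) (q : Int × Int) : Int × Int :=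
  (if q.2 > s.2 then q.1 else s.1, s.2 + q.2)

-- `for v, c in pairs:` appending into the last group when close to its last value
def mciGroups (threshold : Int) (pairs : List (Int × Int)) : List (List (Int × Int)) :=
  pairs.foldl
    (fun gs p =>
      match gs.getLast? with
      | some g =>
        match g.getLast? with
        | some q =>
          if |q.1 - p.1| ≤ threshold then gs.dropLast ++ [g ++ [p]] else gs ++ [[p]]
        | none => gs ++ [[p]]
      | none => gs ++ [[p]]) []

-- `val, total = g[0]` then the loop over `g[1:]`
def mciReduce (g : List (Int × Int)) : Int × Int :=
  match g with
  | [] => (0, 0)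
  | p :: rest => rest.foldl mciStep p

def merge_close_integers_alt (int_list : List Int) (count_list : List Int) (threshold : Int) :
    List Int × List Int :=
  (mciGroups threshold (int_list.zip count_list)).foldl
    (fun acc g => (acc.1 ++ [(mciReduce g).1], acc.2 ++ [(mciReduce g).2])) ([], [])

-- ===== PRECONDITION & SPEC =====
-- Pre_ excludes exactly the inputs where A raises IndexError (count_list shorter than int_list).
def Pre_merge_close_integers (int_list : List Int) (count_list : List Int) (threshold : Int) :
    Prop := int_list.length ≤ count_list.length
instance (int_list : List Int) (count_list : List Int) (threshold : Int) :
    Decidable (Pre_merge_close_integers int_list count_list threshold) := by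
  unfold Pre_merge_close_integers; infer_instance

def pvWitness_merge_close_integers : List Int × List Int × Int :=
  ([3, 6, 15, 30, 32], ([1, 10, 2, 30, 2], 5))

def Spec_merge_close_integers (int_list : List Int) (count_list : List Int) (threshold : Int)
    (out : List Int × List Int) : Prop :=
  out = merge_close_integers_alt int_list count_list threshold
instance (int_list : List Int) (count_list : List Int) (threshold : Int)
    (out : List Int × List Int) : Decidable (Spec_merge_close_integers int_list count_list threshold out) := by
  unfold Spec_merge_close_integers; infer_instance

-- ===== CLAIM (what is proved, stated in full; the proofs are below) =====
def Claim_equal_merge_close_integers : Prop := ∀ (int_list : List Int) (count_list : List Int) (threshold : Int), Dom_merge_close_integers int_list count_list threshold → Pre_merge_close_integers int_list count_list threshold → Spec_merge_close_integers int_list count_list threshold (merge_close_integers int_list count_list threshold)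

-- ===== LEMMAS AND PROOFS =====

-- The common reference shape: chop one chain of close pairs off the front (given the value
-- of the previous element), and the full chain decomposition.
def mciChop (threshold prev : Int) : List (Int × Int) → List (Int × Int) × List (Int × Int)
  | [] => ([], [])
  | p :: rest =>
    if |prev - p.1| ≤ threshold then
      let r := mciChop threshold p.1 rest
      (p :: r.1, r.2)
    else
      ([], p :: rest)

theorem mciChop_append (threshold : Int) :
    ∀ (l : List (Int × Int)) (prev : Int),
      (mciChop threshold prev l).1 ++ (mciChop threshold prev l).2 = l := by
  intro l
  induction l with
  | nil => intro prev; simp [mciChop]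
  | cons p rest ih =>
    intro prev
    by_cases h : |prev - p.1| ≤ threshold
    · simp [mciChop, h, ih]
    · simp [mciChop, h]

def mciSpecGo (threshold : Int) : List (Int × Int) → List (List (Int × Int))
  | [] => []
  | p :: rest =>
    let r := mciChop threshold p.1 rest
    (p :: r.1) :: mciSpecGo threshold r.2
termination_by l => l.length
decreasing_by
  have h := mciChop_append threshold rest p.1
  have : (mciChop threshold p.1 rest).2.length ≤ rest.length := by
    calc (mciChop threshold p.1 rest).2.length
        ≤ (mciChop threshold p.1 rest).1.length + (mciChop threshold p.1 rest).2.length := by omega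
      _ = rest.length := by rw [← List.length_append, h]
  simp; omega

-- B-side: the foldl building `groups` produces exactly the chop decomposition.
theorem mciGroups_step (threshold : Int) :
    ∀ (rest : List (Int × Int)) (gs0 : List (List (Int × Int))) (g : List (Int × Int))
      (q : Int × Int), g.getLast? = some q →
      rest.foldl
        (fun gs p =>
          match gs.getLast? with
          | some g' =>
            match g'.getLast? with
            | some q' =>
              if |q'.1 - p.1| ≤ threshold then gs.dropLast ++ [g' ++ [p]] else gs ++ [[p]]
            | none => gs ++ [[p]]
          | none => gs ++ [[p]]) (gs0 ++ [g])
      = gs0 ++ ((g ++ (mciChop threshold q.1 rest).1) ::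
          mciSpecGo threshold (mciChop threshold q.1 rest).2) := by
  intro rest
  induction rest with
  | nil =>
    intro gs0 g q hq
    simp [mciChop, mciSpecGo]
  | cons p rest ih =>
    intro gs0 g q hq
    have hlast : (gs0 ++ [g]).getLast? = some g := by
      simp [List.getLast?_append]
    rw [List.foldl_cons]
    simp only [hlast, hq]
    by_cases h : |q.1 - p.1| ≤ threshold
    · simp only [h, if_true, List.dropLast_concat]
      rw [ih gs0 (g ++ [p]) p (by simp)]
      simp [mciChop, h]
    · simp only [h, if_false]
      rw [show gs0 ++ [g] ++ [[p]] = (gs0 ++ [g]) ++ [[p]] by simp]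
      rw [ih (gs0 ++ [g]) [p] p (by simp)]
      simp [mciChop, h, mciSpecGo]

theorem mciGroups_eq_spec (threshold : Int) (pairs : List (Int × Int)) :
    mciGroups threshold pairs = mciSpecGo threshold pairs := by
  cases pairs with
  | nil => simp [mciGroups, mciSpecGo]
  | cons p rest =>
    unfold mciGroups
    rw [List.foldl_cons]
    have h0 := mciGroups_step threshold rest [] [p] p (by simp)
    simp only [List.nil_append] at h0
    rw [show (match ([] : List (List (Int × Int))).getLast? with
      | some g =>
        match g.getLast? with
        | some q =>
          if |q.1 - p.1| ≤ threshold then ([] : List (List (Int × Int))).dropLast ++ [g ++ [p]]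
          else [] ++ [[p]]
        | none => [] ++ [[p]]
      | none => ([] : List (List (Int × Int))) ++ [[p]]) = [[p]] from rfl]
    rw [h0]
    simp [mciSpecGo]

-- B-side: the final foldl over groups is the pair of maps.
theorem mciFinal_foldl (gs : List (List (Int × Int))) :
    ∀ (a b : List Int),
      gs.foldl (fun acc g => (acc.1 ++ [(mciReduce g).1], acc.2 ++ [(mciReduce g).2])) (a, b)
      = (a ++ gs.map (fun g => (mciReduce g).1), b ++ gs.map (fun g => (mciReduce g).2)) := by
  induction gs with
  | nil => intro a b; simp
  | cons g gs ih => intro a b; simp [ih]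

-- accessing the zipped list under Pre_
theorem mci_drop_head (int_list count_list : List Int)
    (hpre : int_list.length ≤ count_list.length) (i : Nat) (p : Int × Int)
    (rest : List (Int × Int)) (h : (int_list.zip count_list).drop i = p :: rest) :
    int_list.getD i 0 = p.1 ∧ count_list.getD i 0 = p.2 ∧ i < int_list.length := by
  have hlen : (int_list.zip count_list).length = int_list.length := by
    simp [List.length_zip]; omega
  have hi : i < (int_list.zip count_list).length := by
    by_contra hcon
    rw [List.drop_eq_nil_of_le (by omega)] at h
    exact (List.cons_ne_nil _ _ h.symm).elim
  have hget? : (int_list.zip count_list)[i]? = some p := by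
    rw [← List.head?_drop, h]
    rfl
  have hget : (int_list.zip count_list)[i] = p := by
    rw [List.getElem?_eq_getElem hi] at hget?
    exact Option.some.inj hget?
  have hil : i < int_list.length := by omega
  have hcl : i < count_list.length := by omega
  rw [List.getElem_zip] at hget
  constructor
  · rw [List.getD_eq_getElem _ _ hil, ← congrArg Prod.fst hget]
  constructor
  · rw [List.getD_eq_getElem _ _ hcl, ← congrArg Prod.snd hget]
  · exact hil

theorem mci_drop_nil (int_list count_list : List Int)
    (hpre : int_list.length ≤ count_list.length) (i : Nat)
    (h : (int_list.zip count_list).drop i = []) : int_list.length ≤ i := by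
  have hlen : (int_list.zip count_list).length = int_list.length := by
    simp [List.length_zip]; omega
  have := List.drop_eq_nil_iff.mp h
  omega

-- A-side inner loop computes the chop of the suffix plus the fold over the chopped chain.
theorem mciInner_eq_chop (int_list count_list : List Int) (threshold : Int)
    (hpre : int_list.length ≤ count_list.length) :
    ∀ (rest : List (Int × Int)) (fuel i : Nat) (ci cc : Int),
      rest.length ≤ fuel →
      (int_list.zip count_list).drop (i + 1) = rest → i < int_list.length →
      mciInner int_list count_list threshold fuel i ci cc
      = (i + (mciChop threshold (int_list.getD i 0) rest).1.length,
         (mciChop threshold (int_list.getD i 0) rest).1.foldl mciStep (ci, cc)) := by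
  intro rest
  induction rest with
  | nil =>
    intro fuel i ci cc hf hdrop hi
    have hge := mci_drop_nil int_list count_list hpre (i + 1) hdrop
    cases fuel with
    | zero => simp [mciInner, mciChop]
    | succ f =>
      rw [mciInner]
      have hne : ¬ (i + 1 < int_list.length ∧
          |int_list.getD i 0 - int_list.getD (i + 1) 0| ≤ threshold) := by
        intro ⟨h1, _⟩; omega
      rw [if_neg hne]
      simp [mciChop]
  | cons p rest ih =>
    intro fuel i ci cc hf hdrop hi
    obtain ⟨hv, hc, hi1⟩ := mci_drop_head int_list count_list hpre (i + 1) p rest hdrop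
    cases fuel with
    | zero => simp at hf
    | succ f =>
      by_cases hcl : |int_list.getD i 0 - p.1| ≤ threshold
      · rw [mciInner]
        have hcond : i + 1 < int_list.length ∧
            |int_list.getD i 0 - int_list.getD (i + 1) 0| ≤ threshold := by
          rw [hv]; exact ⟨hi1, hcl⟩
        rw [if_pos hcond]
        have hdrop' : (int_list.zip count_list).drop (i + 1 + 1) = rest := by
          have := congrArg List.tail hdrop
          simpa [List.tail_drop] using this
        have hf' : rest.length ≤ f := by simp at hf; omega
        rw [ih f (i + 1) _ _ hf' hdrop' hi1, hv, hc]
        have hchop : mciChop threshold (int_list.getD i 0) (p :: rest)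
            = (p :: (mciChop threshold p.1 rest).1, (mciChop threshold p.1 rest).2) := by
          rw [mciChop, if_pos hcl]
        rw [hchop]
        simp only [Prod.mk.injEq, List.length_cons, List.foldl_cons]
        exact ⟨by omega, rfl⟩
      · rw [mciInner]
        have hcond : ¬ (i + 1 < int_list.length ∧
            |int_list.getD i 0 - int_list.getD (i + 1) 0| ≤ threshold) := by
          rw [hv]; intro ⟨_, h2⟩; exact hcl h2
        rw [if_neg hcond]
        rw [mciChop, if_neg hcl]
        simp

-- A-side outer loop produces the mapped reduction of the chain decomposition.
theorem mciOuter_eq_spec (int_list count_list : List Int) (threshold : Int)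
    (hpre : int_list.length ≤ count_list.length) :
    ∀ (fuel : Nat) (rest : List (Int × Int)) (i : Nat) (mi mc : List Int),
      rest.length ≤ fuel → (int_list.zip count_list).drop i = rest →
      mciOuter int_list count_list threshold fuel i mi mc
      = (mi ++ (mciSpecGo threshold rest).map (fun g => (mciReduce g).1),
         mc ++ (mciSpecGo threshold rest).map (fun g => (mciReduce g).2)) := by
  intro fuel
  induction fuel with
  | zero =>
    intro rest i mi mc hn hdrop
    have : rest = [] := List.eq_nil_of_length_eq_zero (by omega)
    subst this
    simp [mciOuter, mciSpecGo]
  | succ n ih =>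
    intro rest i mi mc hn hdrop
    cases rest with
    | nil =>
      have hge := mci_drop_nil int_list count_list hpre i hdrop
      rw [mciOuter, if_neg (by omega)]
      simp [mciSpecGo]
    | cons p rest' =>
      obtain ⟨hv, hc, hi⟩ := mci_drop_head int_list count_list hpre i p rest' hdrop
      rw [mciOuter, if_pos hi]
      have hdrop' : (int_list.zip count_list).drop (i + 1) = rest' := by
        have := congrArg List.tail hdrop
        simpa [List.tail_drop] using this
      have hf' : rest'.length ≤ int_list.length + 1 := by
        rw [← hdrop']
        simp [List.length_zip]
        omega
      simp only []
      rw [mciInner_eq_chop int_list count_list threshold hpre rest'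
        (int_list.length + 1) i _ _ hf' hdrop' hi]
      set c := mciChop threshold (int_list.getD i 0) rest' with hcdef
      have hsplit : c.1 ++ c.2 = rest' := mciChop_append threshold rest' _
      have hdrop'' : (int_list.zip count_list).drop (i + c.1.length + 1) = c.2 := by
        have h2 : (int_list.zip count_list).drop (i + 1 + c.1.length) = rest'.drop c.1.length := by
          rw [← hdrop', List.drop_drop]
        have h3 : List.drop c.1.length (c.1 ++ c.2) = c.2 := List.drop_left
        rw [hsplit] at h3
        rw [show i + c.1.length + 1 = i + 1 + c.1.length by omega, h2, h3]
      have hlen2 : c.2.length ≤ n := by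
        have := congrArg List.length hsplit
        simp at this hn
        omega
      rw [ih c.2 (i + c.1.length + 1) _ _ hlen2 hdrop'']
      have hspec : mciSpecGo threshold (p :: rest') =
          (p :: (mciChop threshold p.1 rest').1) ::
            mciSpecGo threshold (mciChop threshold p.1 rest').2 := by
        rw [mciSpecGo]
      rw [hspec]
      have hpv : mciChop threshold p.1 rest' = c := by rw [hcdef, hv]
      rw [hpv]
      have hred : mciReduce (p :: c.1) = c.1.foldl mciStep p := rfl
      simp only [List.map_cons, hred]
      rw [hv, hc]
      simp [List.append_assoc]

-- ===== VERDICT (by name: the statement is the Claim_ definition above) =====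
theorem merge_close_integers_spec : Claim_equal_merge_close_integers := by
  intro int_list count_list threshold _ hpre
  unfold Spec_merge_close_integers merge_close_integers merge_close_integers_alt
  rw [mciGroups_eq_spec, mciFinal_foldl]
  exact mciOuter_eq_spec int_list count_list threshold hpre
    (int_list.length + 1) (int_list.zip count_list) 0 [] []
    (by simp only [List.length_zip]; omega) rfl
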